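-- pv_equiv track=rewrite | github.com/Erakla/habitica-python-tools | QuestRecommendation/webhook.py | determine_best_stat_quest
-- ===== SOURCE A (Python) =====
-- def determine_best_stat_quest(party_quests):
--     # wenn user vorteile haben, bestimme die summe an boni pro quest
--     # und ermittel die quest mit der größten summe
--     best_quest = ''
--     for quest in party_quests:
--         party_quests[quest]['stat_improvement_sum'] = 0
--         for elem in party_quests[quest]['stat_advantage']:
--             party_quests[quest]['stat_improvement_sum'] += elem[1]
--         if party_quests[quest]['stat_improvement_sum']:
--             if best_quest == '':
--                 best_quest = quest
--             elif party_quests[best_quest]['stat_improvement_sum'] < party_quests[quest]['stat_improvement_sum']: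
--                 best_quest = quest
--     if best_quest:
--         return [best_quest], 'new best item belonging to stat bonuses'
--     return [], ''
-- ===== SOURCE B (Python) =====
-- def determine_best_stat_quest(party_quests):
--     # store each quest's bonus sum (same mutation as the original), then rank all
--     # nonzero-sum quests by that sum with a stable descending sort and take the head;
--     # stability means ties keep insertion order, i.e. the first maximal quest wins
--     for quest in party_quests:
--         party_quests[quest]['stat_improvement_sum'] = sum(
--             elem[1] for elem in party_quests[quest]['stat_advantage'])
--     ranked = sorted((q for q in party_quests if party_quests[q]['stat_improvement_sum']),
--                     key=lambda q: party_quests[q]['stat_improvement_sum'],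
--                     reverse=True)
--     if ranked:
--         return [ranked[0]], 'new best item belonging to stat bonuses'
--     return [], ''
-- ===== Notes on version B (the rewrite author's own statement) =====
-- stated objective: alternative
-- what changed: Replaces A's single stateful best-tracking loop (with '' doubling as a 'no best yet' sentinel) by sum-then-sort: store every quest's bonus sum, stably sort the nonzero-sum quests by that sum descending (ties keep insertion order) and take the head; this also fixes A's conflation of a quest literally named '' with its sentinel.
-- intended difference: When the quest named '' has a nonzero stat-bonus sum strictly greater than every earlier quest's nonzero sum and at least every later quest's nonzero sum, A conflates it with its ''-sentinel and returns ([], '') or a later, smaller-sum quest, while B returns ([''], 'new best item belonging to stat bonuses'), the actual first maximal quest, which is the intended value. — e.g. on determine_best_stat_quest([("", [("stat_advantage", [("str", 1)])])]): A returns ([], ""), B returns ([""], "new best item belonging to stat bonuses")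
import Mathlib
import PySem

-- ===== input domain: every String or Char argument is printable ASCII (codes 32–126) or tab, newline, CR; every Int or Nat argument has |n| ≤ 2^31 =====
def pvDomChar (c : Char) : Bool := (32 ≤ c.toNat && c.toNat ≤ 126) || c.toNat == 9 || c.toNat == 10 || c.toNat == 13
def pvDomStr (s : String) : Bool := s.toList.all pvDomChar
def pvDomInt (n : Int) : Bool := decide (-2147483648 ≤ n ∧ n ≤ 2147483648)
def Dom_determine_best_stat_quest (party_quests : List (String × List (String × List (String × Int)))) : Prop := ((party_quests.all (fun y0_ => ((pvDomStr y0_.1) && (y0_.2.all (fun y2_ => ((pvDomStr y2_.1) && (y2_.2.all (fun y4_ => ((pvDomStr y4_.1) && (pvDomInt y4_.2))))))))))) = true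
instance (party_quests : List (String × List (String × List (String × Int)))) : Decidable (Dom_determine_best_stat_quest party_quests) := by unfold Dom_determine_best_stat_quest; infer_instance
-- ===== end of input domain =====

-- B replaces A's single stateful best-tracking loop by sum-then-sort: store every quest's sum,
-- stably sort the nonzero-sum quests by sum descending and take the head; equivalence is about the
-- RETURN value only (both Pythons write quest['stat_improvement_sum'] into the argument; the Lean
-- type cannot hold it).


-- ===== PORT A =====
-- the inner loop: quest['stat_improvement_sum'] = 0; for elem in quest['stat_advantage']: += elem[1]
-- (the ['stat_advantage'] lookup raises KeyError when absent: Pre_ excludes that)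
def pvQSum (d : List (String × List (String × Int))) : Int :=
  (((PySem.Dict.mk d).get? "stat_advantage").getD []).foldl (fun acc elem => acc + elem.2) 0

-- The Python writes party_quests[quest]['stat_improvement_sum']; the Lean value type cannot hold
-- that extra field, so the sum written for the current best quest is carried alongside best_quest
-- (exact: dict keys are unique, so re-reading the stored sum yields the value that was written).
def determine_best_stat_quest (party_quests : List (String × List (String × List (String × Int)))) : List String × String :=
  let st := party_quests.foldl
    (fun (st : String × Int) e =>
      let s := pvQSum e.2
      if s ≠ 0 then
        if st.1 == "" then (e.1, s)
        else if st.2 < s then (e.1, s)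
        else st
      else st)
    ("", 0)
  if st.1 ≠ "" then ([st.1], "new best item belonging to stat bonuses") else ([], "")

-- ===== PORT B =====
-- Source B's first pass stores each quest's sum under 'stat_improvement_sum'; modeled as a side
-- table keyed by quest name (same representation reason as in port A).
def altQuestSum (d : List (String × List (String × Int))) : Int :=
  ((((PySem.Dict.mk d).get? "stat_advantage").getD []).map (fun elem => elem.2)).sum

def determine_best_stat_quest_alt (party_quests : List (String × List (String × List (String × Int)))) : List String × String :=
  let sums : PySem.Dict String Int := PySem.Dict.mk (party_quests.map (fun e => (e.1, altQuestSum e.2)))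
  let ranked : List String :=
    PySem.List.sorted ((party_quests.map (fun e => e.1)).filter (fun q => decide (sums.getD q 0 ≠ 0)))
      (fun q => sums.getD q 0) true
  match ranked with
  | [] => ([], "")
  | best :: _ => ([best], "new best item belonging to stat bonuses")

-- ===== PRECONDITION & SPEC =====
-- Pre_ excludes quest dicts without a 'stat_advantage' key (KeyError in both A and B) and
-- association lists with duplicate outer or inner keys, which cannot arise from a Python dict
-- (the dict collapses them, so the assoc-list first-match value would be accidental).
def Pre_determine_best_stat_quest (party_quests : List (String × List (String × List (String × Int)))) : Prop :=
  (party_quests.map (fun e => e.1)).Nodup ∧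
  ∀ e ∈ party_quests, (e.2.map (fun p => p.1)).Nodup ∧ "stat_advantage" ∈ e.2.map (fun p => p.1)
instance (party_quests : List (String × List (String × List (String × Int)))) : Decidable (Pre_determine_best_stat_quest party_quests) := by unfold Pre_determine_best_stat_quest; infer_instance

def pvWitness_determine_best_stat_quest : (List (String × List (String × List (String × Int)))) :=
  [("a", [("stat_advantage", [("str", 2)])]), ("b", [("stat_advantage", [("int", 3), ("per", -1)])])]

-- When the quest named '' has a nonzero stat-bonus sum strictly greater than every earlier quest's
-- nonzero sum and at least every later quest's nonzero sum, A conflates that quest with its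
-- ''-sentinel and returns ([], '') or a later quest; B returns ([''], 'new best item belonging to
-- stat bonuses') — the actual first maximal quest — which is the intended value.
def D_determine_best_stat_quest (party_quests : List (String × List (String × List (String × Int)))) : Prop :=
  ∃ i : Fin party_quests.length, party_quests[i].1 = "" ∧
    let s := pvQSum party_quests[i].2
    s ≠ 0 ∧ ∀ j : Fin party_quests.length,
      let t := pvQSum party_quests[j].2
      t < s ∨ (t = s ∧ i.1 ≤ j.1) ∨ t = 0
instance (party_quests : List (String × List (String × List (String × Int)))) : Decidable (D_determine_best_stat_quest party_quests) := by unfold D_determine_best_stat_quest; infer_instance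

def Spec_determine_best_stat_quest (party_quests : List (String × List (String × List (String × Int)))) (out : List String × String) : Prop :=
  ¬ D_determine_best_stat_quest party_quests → out = determine_best_stat_quest_alt party_quests
instance (party_quests : List (String × List (String × List (String × Int)))) (out : List String × String) : Decidable (Spec_determine_best_stat_quest party_quests out) := by unfold Spec_determine_best_stat_quest; infer_instance

def pvDiffWitness_determine_best_stat_quest : (List (String × List (String × List (String × Int)))) :=
  [("", [("stat_advantage", [("str", 1)])])]
def pvDiffWitnessOut_determine_best_stat_quest : (List String × String) × (List String × String) :=
  (([], ""), ([""], "new best item belonging to stat bonuses"))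

-- ===== CLAIM (what is proved, stated in full; the proofs are below) =====
def Claim_unchanged_determine_best_stat_quest : Prop := ∀ (party_quests : List (String × List (String × List (String × Int)))), Dom_determine_best_stat_quest party_quests → Pre_determine_best_stat_quest party_quests → Spec_determine_best_stat_quest party_quests (determine_best_stat_quest party_quests)
def Claim_changed_determine_best_stat_quest : Prop := Dom_determine_best_stat_quest (pvDiffWitness_determine_best_stat_quest) ∧ Pre_determine_best_stat_quest (pvDiffWitness_determine_best_stat_quest) ∧ D_determine_best_stat_quest (pvDiffWitness_determine_best_stat_quest) ∧ determine_best_stat_quest (pvDiffWitness_determine_best_stat_quest) = pvDiffWitnessOut_determine_best_stat_quest.1 ∧ determine_best_stat_quest_alt (pvDiffWitness_determine_best_stat_quest) = pvDiffWitnessOut_determine_best_stat_quest.2 ∧ pvDiffWitnessOut_determine_best_stat_quest.1 ≠ pvDiffWitnessOut_determine_best_stat_quest.2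
def Claim_exact_determine_best_stat_quest : Prop := ∀ (party_quests : List (String × List (String × List (String × Int)))), Dom_determine_best_stat_quest party_quests → Pre_determine_best_stat_quest party_quests → D_determine_best_stat_quest party_quests → determine_best_stat_quest party_quests ≠ determine_best_stat_quest_alt party_quests

-- ===== LEMMAS AND PROOFS =====
-- (helpers below are proof-side only)

def pvStepNZ (st p : String × Int) : String × Int :=
  if st.1 == "" then p else if st.2 < p.2 then p else st

def pvStep (st p : String × Int) : String × Int :=
  if p.2 ≠ 0 then pvStepNZ st p else st

def pvFM (o : Option (String × Int)) (l : List (String × Int)) : Option (String × Int) :=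
  l.foldl (fun o p => match o with | none => some p | some q => if q.2 < p.2 then some p else some q) o

def pvRun (a : String × Int) (l : List (String × Int)) : String × Int :=
  l.foldl (fun q p => if q.2 < p.2 then p else q) a

def pvCands (pq : List (String × List (String × List (String × Int)))) : List (String × Int) :=
  (pq.map (fun e => (e.1, pvQSum e.2))).filter (fun p => decide (p.2 ≠ 0))

theorem foldl_add_eq_sum (l : List (String × Int)) (a : Int) :
    l.foldl (fun acc elem => acc + elem.2) a = a + (l.map (fun e => e.2)).sum := by
  induction l generalizing a with
  | nil => simp
  | cons p t ih => simp [List.foldl_cons, ih]; ring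

theorem altQuestSum_eq (d : List (String × List (String × Int))) :
    altQuestSum d = pvQSum d := by
  simp only [altQuestSum, pvQSum, foldl_add_eq_sum]
  simp

theorem foldl_step_filter (l : List (String × Int)) (st : String × Int) :
    l.foldl pvStep st = (l.filter (fun p => decide (p.2 ≠ 0))).foldl pvStepNZ st := by
  induction l generalizing st with
  | nil => rfl
  | cons p t ih =>
      by_cases h : p.2 = 0 <;> simp [pvStep, h, ih]

theorem pvFM_cons (o : Option (String × Int)) (p : String × Int) (t : List (String × Int)) :
    pvFM o (p :: t)
      = pvFM (match o with | none => some p | some q => if q.2 < p.2 then some p else some q) t := rfl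

theorem pvRun_cons (a p : String × Int) (t : List (String × Int)) :
    pvRun a (p :: t) = pvRun (if a.2 < p.2 then p else a) t := rfl

theorem A_char (pq : List (String × List (String × List (String × Int)))) :
    determine_best_stat_quest pq =
      (if ((pvCands pq).foldl pvStepNZ ("", 0)).1 ≠ ""
       then ([((pvCands pq).foldl pvStepNZ ("", 0)).1], "new best item belonging to stat bonuses")
       else ([], "")) := by
  unfold determine_best_stat_quest
  have h1 : pq.foldl
      (fun (st : String × Int) e =>
        let s := pvQSum e.2
        if s ≠ 0 then
          if st.1 == "" then (e.1, s)
          else if st.2 < s then (e.1, s)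
          else st
        else st) ("", 0)
      = pq.foldl (fun st e => pvStep st (e.1, pvQSum e.2)) ("", 0) := rfl
  rw [h1]
  have h2 : pq.foldl (fun st e => pvStep st (e.1, pvQSum e.2)) ("", 0)
      = (pvCands pq).foldl pvStepNZ ("", 0) := by
    rw [show (fun (st : String × Int) (e : String × List (String × List (String × Int))) =>
        pvStep st (e.1, pvQSum e.2))
      = (fun st e => pvStep st ((fun x => (x.1, pvQSum x.2)) e)) from rfl, ← List.foldl_map,
      foldl_step_filter]
    rfl
  rw [h2]

theorem pvFM_some (l : List (String × Int)) (a : String × Int) :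
    pvFM (some a) l = some (pvRun a l) := by
  induction l generalizing a with
  | nil => rfl
  | cons p t ih =>
      rw [pvFM_cons, pvRun_cons]
      dsimp only
      by_cases h : a.2 < p.2 <;> simp only [if_pos, if_neg, h, ite_true, ite_false] <;> exact ih _

theorem pvRun_mem (l : List (String × Int)) (a : String × Int) :
    pvRun a l = a ∨ pvRun a l ∈ l := by
  induction l generalizing a with
  | nil => left; rfl
  | cons p t ih =>
      rw [pvRun_cons]
      by_cases h : a.2 < p.2
      · rw [if_pos h]
        rcases ih p with h' | h'
        · right; simp [h']
        · right; simp [h']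
      · rw [if_neg h]
        rcases ih a with h' | h'
        · left; exact h'
        · right; simp [h']

theorem pvRun_max (l : List (String × Int)) (a : String × Int) :
    a.2 ≤ (pvRun a l).2 ∧ ∀ x ∈ l, x.2 ≤ (pvRun a l).2 := by
  induction l generalizing a with
  | nil => simp [pvRun]
  | cons p t ih =>
      rw [pvRun_cons]
      by_cases h : a.2 < p.2
      · rw [if_pos h]
        rcases ih p with ⟨h1, h2⟩
        refine ⟨by omega, ?_⟩
        intro x hx
        rcases List.mem_cons.mp hx with rfl | hx
        · exact h1
        · exact h2 x hx
      · rw [if_neg h]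
        rcases ih a with ⟨h1, h2⟩
        refine ⟨h1, ?_⟩
        intro x hx
        rcases List.mem_cons.mp hx with rfl | hx
        · omega
        · exact h2 x hx

theorem pvFM_mem (l : List (String × Int)) (p : String × Int) (h : pvFM none l = some p) :
    p ∈ l := by
  cases l with
  | nil => simp [pvFM] at h
  | cons q t =>
      rw [pvFM_cons] at h
      dsimp only at h
      rw [pvFM_some] at h
      cases h
      rcases pvRun_mem t q with h | h
      · simp [h]
      · simp [h]

theorem pvFM_max (l : List (String × Int)) (m : String × Int) (h : pvFM none l = some m) :
    ∀ x ∈ l, x.2 ≤ m.2 := by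
  cases l with
  | nil => simp [pvFM] at h
  | cons q t =>
      rw [pvFM_cons] at h
      dsimp only at h
      rw [pvFM_some] at h
      cases h
      intro x hx
      rcases List.mem_cons.mp hx with rfl | hx
      · exact (pvRun_max t x).1
      · exact (pvRun_max t q).2 x hx

theorem pvFM_absorb (l : List (String × Int)) (a : String × Int)
    (h : ∃ w ∈ l, a.2 < w.2) : pvFM (some a) l = pvFM none l := by
  induction l generalizing a with
  | nil => rcases h with ⟨w, hw, _⟩; cases hw
  | cons p t ih =>
      rw [pvFM_cons, pvFM_cons none]
      dsimp only
      by_cases hp : a.2 < p.2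
      · rw [if_pos hp]
      · rw [if_neg hp]
        rcases h with ⟨w, hw, haw⟩
        rcases List.mem_cons.mp hw with rfl | hwt
        · omega
        · rw [ih a ⟨w, hwt, haw⟩, ih p ⟨w, hwt, by omega⟩]

theorem pvRun_keep (l : List (String × Int)) (a : String × Int)
    (h : ∀ w ∈ l, w.2 ≤ a.2) : pvRun a l = a := by
  induction l with
  | nil => rfl
  | cons p t ih =>
      have hp : ¬ a.2 < p.2 := by have := h p (by simp); omega
      rw [pvRun_cons, if_neg hp]
      exact ih (fun w hw => h w (by simp [hw]))

theorem LA1 (l : List (String × Int)) (hl : ∀ p ∈ l, p.1 ≠ "") :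
    ∀ b s, b ≠ "" → l.foldl pvStepNZ (b, s) = pvRun (b, s) l := by
  induction l with
  | nil => intro b s _; rfl
  | cons p t ih =>
      intro b s hb
      have hbeq : (b == "") = false := by simp [hb]
      rw [List.foldl_cons, show pvStepNZ (b, s) p = if s < p.2 then p else (b, s) by
        simp [pvStepNZ, hbeq], pvRun_cons]
      by_cases h : s < p.2
      · rw [if_pos h]
        have hp := hl p (by simp)
        rw [show t.foldl pvStepNZ p = t.foldl pvStepNZ (p.1, p.2) by rfl,
          ih (fun q hq => hl q (by simp [hq])) p.1 p.2 hp]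
      · rw [if_neg h]
        exact ih (fun q hq => hl q (by simp [hq])) b s hb

theorem LA0 (l : List (String × Int)) (hl : ∀ p ∈ l, p.1 ≠ "") (s : Int) :
    l.foldl pvStepNZ ("", s)
      = (match pvFM none l with | none => ("", s) | some p => p) := by
  cases l with
  | nil => rfl
  | cons p t =>
      have hp := hl p (by simp)
      rw [List.foldl_cons, show pvStepNZ ("", s) p = p by simp [pvStepNZ],
        show t.foldl pvStepNZ p = t.foldl pvStepNZ (p.1, p.2) by rfl,
        LA1 t (fun q hq => hl q (by simp [hq])) p.1 p.2 hp,
        pvFM_cons]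
      dsimp only
      rw [pvFM_some]

theorem pvCands_append (u v : List (String × List (String × List (String × Int)))) :
    pvCands (u ++ v) = pvCands u ++ pvCands v := by
  simp [pvCands, List.map_append, List.filter_append]

theorem pvCands_cons_nz (e : String × List (String × List (String × Int)))
    (v : List (String × List (String × List (String × Int)))) (h : pvQSum e.2 ≠ 0) :
    pvCands (e :: v) = (e.1, pvQSum e.2) :: pvCands v := by
  simp [pvCands, h]

theorem pvCands_mem (pq : List (String × List (String × List (String × Int))))
    (p : String × Int) (hp : p ∈ pvCands pq) :
    ∃ e ∈ pq, p = (e.1, pvQSum e.2) ∧ pvQSum e.2 ≠ 0 := by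
  simp only [pvCands, List.mem_filter, List.mem_map] at hp
  rcases hp with ⟨⟨e, he, rfl⟩, hnz⟩
  exact ⟨e, he, rfl, by simpa using hnz⟩

theorem pvCands_names_ne (pq : List (String × List (String × List (String × Int))))
    (h : "" ∉ pq.map (fun e => e.1)) : ∀ p ∈ pvCands pq, p.1 ≠ "" := by
  intro p hp h0
  rcases pvCands_mem pq p hp with ⟨e, he, rfl, _⟩
  exact h (List.mem_map.mpr ⟨e, he, h0⟩)

theorem find?_assoc_nodup {α : Type} (l : List (String × α)) (k : String) (v : α)
    (hnd : (l.map (fun e => e.1)).Nodup) (hm : (k, v) ∈ l) :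
    l.find? (fun p => p.1 == k) = some (k, v) := by
  induction l with
  | nil => cases hm
  | cons f t ih =>
      rw [List.map_cons, List.nodup_cons] at hnd
      rw [List.find?_cons]
      by_cases hf : f.1 = k
      · have : f = (k, v) := by
          rcases List.mem_cons.mp hm with rfl | hmt
          · rfl
          · have hk : k ∈ t.map (fun e => e.1) := List.mem_map.mpr ⟨(k, v), hmt, rfl⟩
            exact absurd hk (hf ▸ hnd.1)
        simp [this]
      · have hmt : (k, v) ∈ t := by
          rcases List.mem_cons.mp hm with h' | h'
          · exact absurd (congrArg Prod.fst h'.symm) hf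
          · exact h'
        simp only [show (f.1 == k) = false by simp [hf]]
        exact ih hnd.2 hmt

theorem sums_getD (pq : List (String × List (String × List (String × Int))))
    (hnd : (pq.map (fun e => e.1)).Nodup)
    (e : String × List (String × List (String × Int))) (he : e ∈ pq) :
    (PySem.Dict.mk (pq.map (fun x => (x.1, altQuestSum x.2)))).getD e.1 0 = pvQSum e.2 := by
  have hm : (e.1, altQuestSum e.2) ∈ pq.map (fun x => (x.1, altQuestSum x.2)) :=
    List.mem_map.mpr ⟨e, he, rfl⟩
  have hnd2 : ((pq.map (fun x => (x.1, altQuestSum x.2))).map (fun p => p.1)).Nodup := by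
    simpa [List.map_map, Function.comp] using hnd
  rw [PySem.Dict.getD, PySem.Dict.get?,
    show (PySem.Dict.mk (pq.map (fun x => (x.1, altQuestSum x.2)))).items
      = pq.map (fun x => (x.1, altQuestSum x.2)) from rfl,
    find?_assoc_nodup _ _ _ hnd2 hm]
  simp [altQuestSum_eq]

theorem pvCands_eq (pq : List (String × List (String × List (String × Int)))) :
    pvCands pq = (pq.filter (fun e => decide (pvQSum e.2 ≠ 0))).map (fun e => (e.1, pvQSum e.2)) := by
  induction pq with
  | nil => rfl
  | cons e t ih =>
      by_cases h : pvQSum e.2 = 0 <;> simp [pvCands, h, List.filter_cons] at * <;> simpa using ih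

theorem head_insertBy {α : Type} (bef : α → α → Bool) (x : α) (l : List α) :
    (PySem.List.insertBy bef x l).head?
      = some (match l.head? with | none => x | some y => if bef x y then x else y) := by
  cases l with
  | nil => rfl
  | cons y ys =>
      by_cases h : bef x y <;> simp [PySem.List.insertBy, h]

-- the head of the stable descending insertion sort is the first key-maximal element:
-- folding insertBy over names (with the key of each name fixed by the paired list) drives
-- the head exactly like pvFM drives its running first maximum
theorem head_lift (key : String → Int) :
    ∀ (l : List (String × Int)) (acc : List String),
    (∀ p ∈ l, key p.1 = p.2) →
    ((l.map (fun p => p.1)).foldl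
        (fun acc q => PySem.List.insertBy (fun a b => decide (key b < key a)) q acc) acc).head?
      = (pvFM (acc.head?.map (fun h => (h, key h))) l).map (fun p => p.1) := by
  intro l
  induction l with
  | nil =>
      intro acc _
      cases acc <;> simp [pvFM]
  | cons p t ih =>
      intro acc hl
      have hp : key p.1 = p.2 := hl p (by simp)
      rw [List.map_cons, List.foldl_cons, pvFM_cons,
        ih (PySem.List.insertBy (fun a b => decide (key b < key a)) p.1 acc)
          (fun q hq => hl q (by simp [hq]))]
      congr 1
      have hh := head_insertBy (fun a b => decide (key b < key a)) p.1 acc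
      cases acc with
      | nil =>
          simp only [List.head?_nil, Option.map_none]
          rw [show (PySem.List.insertBy (fun a b => decide (key b < key a)) p.1 []).head?
              = some p.1 from hh]
          simp [Option.map_some, hp]
      | cons y ys =>
          simp only [List.head?_cons, Option.map_some] at hh ⊢
          rw [hh]
          by_cases hc : key y < key p.1
          · rw [if_pos (by simpa using hc), if_pos (by rw [hp] at hc; simpa using hc)]
            simp [hp]
          · rw [if_neg (by simpa using hc), if_neg (by rw [hp] at hc; simpa using hc)]
            simp

theorem B_char (pq : List (String × List (String × List (String × Int))))
    (hnd : (pq.map (fun e => e.1)).Nodup) :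
    determine_best_stat_quest_alt pq =
      (match pvFM none (pvCands pq) with
       | none => ([], "")
       | some p => ([p.1], "new best item belonging to stat bonuses")) := by
  unfold determine_best_stat_quest_alt
  show (match PySem.List.sorted
      ((pq.map (fun e => e.1)).filter
        (fun q => decide ((PySem.Dict.mk (pq.map (fun e => (e.1, altQuestSum e.2)))).getD q 0 ≠ 0)))
      (fun q => (PySem.Dict.mk (pq.map (fun e => (e.1, altQuestSum e.2)))).getD q 0) true with
    | [] => ([], "")
    | best :: _ => ([best], "new best item belonging to stat bonuses")) = _
  have hcand : (pq.map (fun e => e.1)).filter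
        (fun q => decide ((PySem.Dict.mk (pq.map (fun e => (e.1, altQuestSum e.2)))).getD q 0 ≠ 0))
      = (pvCands pq).map (fun p => p.1) := by
    rw [List.filter_map, pvCands_eq, List.map_map]
    congr 1
    apply List.filter_congr
    intro e he
    simp [Function.comp, sums_getD pq hnd e he]
  rw [hcand]
  have hkey : ∀ p ∈ pvCands pq,
      (PySem.Dict.mk (pq.map (fun e => (e.1, altQuestSum e.2)))).getD p.1 0 = p.2 := by
    intro p hp
    rcases pvCands_mem pq p hp with ⟨e, he, rfl, _⟩
    exact sums_getD pq hnd e he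
  have hhead : (PySem.List.sorted ((pvCands pq).map (fun p => p.1))
        (fun q => (PySem.Dict.mk (pq.map (fun e => (e.1, altQuestSum e.2)))).getD q 0) true).head?
      = (pvFM none (pvCands pq)).map (fun p => p.1) := by
    rw [PySem.List.sorted_rev_eq_foldl_insertBy]
    exact head_lift _ (pvCands pq) [] hkey
  cases hFM : pvFM none (pvCands pq) with
  | none =>
      rw [hFM] at hhead
      simp only [Option.map_none, List.head?_eq_none_iff] at hhead
      rw [hhead]
  | some p =>
      rw [hFM] at hhead
      cases hr : PySem.List.sorted ((pvCands pq).map (fun p => p.1))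
          (fun q => (PySem.Dict.mk (pq.map (fun e => (e.1, altQuestSum e.2)))).getD q 0) true with
      | nil => rw [hr] at hhead; simp at hhead
      | cons b t =>
          rw [hr] at hhead
          simp only [List.head?_cons, Option.map_some, Option.some_inj] at hhead
          rw [hhead]

theorem D_of_split (u v : List (String × List (String × List (String × Int))))
    (e : String × List (String × List (String × Int)))
    (h1 : e.1 = "") (h2 : pvQSum e.2 ≠ 0)
    (hu : ∀ x ∈ u, pvQSum x.2 ≠ 0 → pvQSum x.2 < pvQSum e.2)
    (hv : ∀ x ∈ v, pvQSum x.2 ≠ 0 → pvQSum x.2 ≤ pvQSum e.2) :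
    D_determine_best_stat_quest (u ++ e :: v) := by
  have hlen : u.length < (u ++ e :: v).length := by simp
  have hget : (u ++ e :: v)[u.length]'hlen = e := by simp
  refine ⟨⟨u.length, hlen⟩, ?_, ?_⟩
  · simpa only [Fin.getElem_fin, hget] using h1
  · simp only [Fin.getElem_fin, hget]
    refine ⟨h2, fun j => ?_⟩
    rcases lt_trichotomy j.1 u.length with hlt | heq | hgt
    · have hju : (u ++ e :: v)[j.1]'j.2 = u[j.1]'(by omega) := List.getElem_append_left (by omega)
      simp only [hju]
      by_cases hz : pvQSum (u[j.1]'(by omega)).2 = 0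
      · exact Or.inr (Or.inr hz)
      · exact Or.inl (hu _ (List.getElem_mem _) hz)
    · have hje : (u ++ e :: v)[j.1]'j.2 = e := by
        rw [show (u ++ e :: v)[j.1]'j.2 = (u ++ e :: v)[u.length]'hlen by congr 1, hget]
      simp only [hje]
      exact Or.inr (Or.inl ⟨by simp, by omega⟩)
    · have hj2 : j.1 - u.length - 1 < v.length := by have := j.2; simp at this; omega
      have hjv : (u ++ e :: v)[j.1]'j.2 = v[j.1 - u.length - 1]'hj2 := by
        rw [show (u ++ e :: v)[j.1]'j.2
            = (u ++ e :: v)[u.length + 1 + (j.1 - u.length - 1)]'(by omega) by congr 1; omega]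
        rw [List.getElem_append_right (by omega)]
        simp [show u.length + 1 + (j.1 - u.length - 1) - u.length = (j.1 - u.length - 1) + 1 by omega]
      simp only [hjv]
      by_cases hz : pvQSum (v[j.1 - u.length - 1]'hj2).2 = 0
      · exact Or.inr (Or.inr hz)
      · rcases lt_or_eq_of_le (hv _ (List.getElem_mem _) hz) with h' | h'
        · exact Or.inl h'
        · exact Or.inr (Or.inl ⟨h', by omega⟩)

theorem split_of_D (u v : List (String × List (String × List (String × Int))))
    (e : String × List (String × List (String × Int)))
    (hnd : (((u ++ e :: v)).map (fun x => x.1)).Nodup) (h1 : e.1 = "")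
    (hD : D_determine_best_stat_quest (u ++ e :: v)) :
    pvQSum e.2 ≠ 0 ∧
    (∀ x ∈ u, pvQSum x.2 ≠ 0 → pvQSum x.2 < pvQSum e.2) ∧
    (∀ x ∈ v, pvQSum x.2 ≠ 0 → pvQSum x.2 ≤ pvQSum e.2) := by
  obtain ⟨i, hi1, hi2, hall⟩ := hD
  simp only [Fin.getElem_fin] at hi1 hi2 hall
  have hlen : u.length < (u ++ e :: v).length := by simp
  have hget : (u ++ e :: v)[u.length]'hlen = e := by simp
  -- the "" name occurs at a unique index, so i = u.length
  have hieq : i.1 = u.length := by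
    by_contra hne
    have hmlen : ((u ++ e :: v).map (fun x => x.1)).length = (u ++ e :: v).length := by simp
    have hmapi : ((u ++ e :: v).map (fun x => x.1))[i.1]'(by rw [hmlen]; exact i.2) = "" := by
      rw [List.getElem_map]; exact hi1
    have hmapn : ((u ++ e :: v).map (fun x => x.1))[u.length]'(by rw [hmlen]; exact hlen) = "" := by
      rw [List.getElem_map, hget]; exact h1
    have hfin := List.nodup_iff_injective_getElem.mp hnd
      (a₁ := ⟨i.1, by rw [hmlen]; exact i.2⟩) (a₂ := ⟨u.length, by rw [hmlen]; exact hlen⟩)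
      (hmapi.trans hmapn.symm)
    exact hne (by simpa using congrArg Fin.val hfin)
  have hie : (u ++ e :: v)[i.1]'i.2 = e := by
    rw [show (u ++ e :: v)[i.1]'i.2 = (u ++ e :: v)[u.length]'hlen by congr 1, hget]
  rw [hie] at hi2
  refine ⟨hi2, ?_, ?_⟩
  · intro x hx hxnz
    obtain ⟨j, hj, rfl⟩ := List.mem_iff_getElem.mp hx
    have hjlen : j < (u ++ e :: v).length := by simp; omega
    have hju : (u ++ e :: v)[j]'hjlen = u[j] := List.getElem_append_left (by omega)
    have htri := hall ⟨j, hjlen⟩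
    simp only [hju, hie] at htri
    rcases htri with h' | ⟨_, hle⟩ | h'
    · exact h'
    · exact absurd hle (by simp; omega)
    · exact absurd h' hxnz
  · intro x hx hxnz
    obtain ⟨j, hj, rfl⟩ := List.mem_iff_getElem.mp hx
    have hjlen : u.length + 1 + j < (u ++ e :: v).length := by simp; omega
    have hjv : (u ++ e :: v)[u.length + 1 + j]'hjlen = v[j] := by
      rw [List.getElem_append_right (by omega)]
      simp [show u.length + 1 + j - u.length = j + 1 by omega]
    have htri := hall ⟨u.length + 1 + j, hjlen⟩
    simp only [hjv, hie] at htri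
    rcases htri with h' | ⟨heq, _⟩ | h'
    · omega
    · omega
    · exact absurd h' hxnz

theorem pvFM_append (o : Option (String × Int)) (l1 l2 : List (String × Int)) :
    pvFM o (l1 ++ l2) = pvFM (pvFM o l1) l2 := by
  simp [pvFM, List.foldl_append]

theorem pvFM_none_nil_iff (l : List (String × Int)) : pvFM none l = none ↔ l = [] := by
  cases l with
  | nil => simp [pvFM]
  | cons p t =>
      rw [pvFM_cons]
      dsimp only
      rw [pvFM_some]
      simp

theorem mem_pvCands_of (l : List (String × List (String × List (String × Int))))
    (e : String × List (String × List (String × Int))) (he : e ∈ l) (h : pvQSum e.2 ≠ 0) :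
    (e.1, pvQSum e.2) ∈ pvCands l := by
  simp only [pvCands, List.mem_filter, List.mem_map]
  exact ⟨⟨e, he, rfl⟩, by simpa using h⟩

theorem main_unchanged (pq : List (String × List (String × List (String × Int))))
    (hpre : Pre_determine_best_stat_quest pq)
    (hnD : ¬ D_determine_best_stat_quest pq) :
    determine_best_stat_quest pq = determine_best_stat_quest_alt pq := by
  obtain ⟨hnd, _hkeys⟩ := hpre
  rw [A_char, B_char pq hnd]
  by_cases hclean : ∀ e ∈ pq, e.1 = "" → pvQSum e.2 = 0
  · have hnames : ∀ p ∈ pvCands pq, p.1 ≠ "" := by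
      intro p hp
      rcases pvCands_mem pq p hp with ⟨e, he, rfl, hnz⟩
      intro h0; exact hnz (hclean e he h0)
    rw [LA0 _ hnames 0]
    cases h : pvFM none (pvCands pq) with
    | none => simp
    | some p =>
        have hp := hnames p (pvFM_mem _ _ h)
        simp [hp]
  · push_neg at hclean
    obtain ⟨e, he, h1, h2⟩ := hclean
    obtain ⟨u, v, rfl⟩ := List.append_of_mem he
    have hndm : (u.map (fun x => x.1) ++ e.1 :: v.map (fun x => x.1)).Nodup := by
      have := hnd
      rwa [List.map_append, List.map_cons] at this
    have hnu : "" ∉ u.map (fun x => x.1) := by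
      have hd := (List.nodup_append.mp hndm).2.2
      intro hmem
      exact hd _ hmem _ (by simp) h1.symm
    have hnv : "" ∉ v.map (fun x => x.1) := by
      have hmid := (List.nodup_append.mp hndm).2.1
      rw [List.nodup_cons] at hmid
      intro hmem; exact hmid.1 (h1 ▸ hmem)
    have hcu_ne := pvCands_names_ne u hnu
    have hcv_ne := pvCands_names_ne v hnv
    have hcands : pvCands (u ++ e :: v) = pvCands u ++ ((e.1, pvQSum e.2) :: pvCands v) := by
      rw [pvCands_append, pvCands_cons_nz e v h2]
    have hsplit : ¬ ((∀ x ∈ u, pvQSum x.2 ≠ 0 → pvQSum x.2 < pvQSum e.2) ∧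
        (∀ x ∈ v, pvQSum x.2 ≠ 0 → pvQSum x.2 ≤ pvQSum e.2)) := by
      rintro ⟨hu', hv'⟩
      exact hnD (D_of_split u v e h1 h2 hu' hv')
    rw [hcands, List.foldl_append, List.foldl_cons, pvFM_append, pvFM_cons,
      LA0 _ hcu_ne 0]
    -- "sentinel took over" situation after the '' quest
    have caseB : (∀ x ∈ u, pvQSum x.2 ≠ 0 → pvQSum x.2 < pvQSum e.2) →
        ∃ m2 : String × Int, m2.1 ≠ "" ∧
          pvFM (some ("", pvQSum e.2)) (pvCands v) = some m2 ∧
          (pvCands v).foldl pvStepNZ ("", pvQSum e.2) = m2 := by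
      intro hu'
      have hvfail : ∃ x ∈ v, pvQSum x.2 ≠ 0 ∧ pvQSum e.2 < pvQSum x.2 := by
        by_contra hno
        push_neg at hno
        exact hsplit ⟨hu', fun x hx hnz => hno x hx hnz⟩
      obtain ⟨x, hx, hxnz, hxgt⟩ := hvfail
      have hw : (x.1, pvQSum x.2) ∈ pvCands v := mem_pvCands_of v x hx hxnz
      have habs : pvFM (some ("", pvQSum e.2)) (pvCands v) = pvFM none (pvCands v) :=
        pvFM_absorb _ _ ⟨(x.1, pvQSum x.2), hw, hxgt⟩
      cases hfm : pvFM none (pvCands v) with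
      | none =>
          exact (List.not_mem_nil ((pvFM_none_nil_iff _).mp hfm ▸ hw)).elim
      | some m2 =>
          exact ⟨m2, hcv_ne m2 (pvFM_mem _ _ hfm), by rw [habs, hfm],
            by rw [LA0 _ hcv_ne (pvQSum e.2), hfm]⟩
    cases hU : pvFM none (pvCands u) with
    | none =>
        have hcu_nil : pvCands u = [] := (pvFM_none_nil_iff _).mp hU
        have hu' : ∀ x ∈ u, pvQSum x.2 ≠ 0 → pvQSum x.2 < pvQSum e.2 := by
          intro x hx hnz
          exact (List.not_mem_nil (hcu_nil ▸ mem_pvCands_of u x hx hnz)).elim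
        obtain ⟨m2, hm2ne, hfm2, hfold2⟩ := caseB hu'
        dsimp only
        rw [show pvStepNZ ("", 0) (e.1, pvQSum e.2) = (e.1, pvQSum e.2) by simp [pvStepNZ], h1,
          hfold2, hfm2]
        simp [hm2ne]
    | some m =>
        have hm1 : m.1 ≠ "" := hcu_ne m (pvFM_mem _ _ hU)
        have hmbeq : (m.1 == "") = false := by simp [hm1]
        dsimp only
        by_cases hms : m.2 < pvQSum e.2
        · -- m is beaten by the '' quest: sentinel state
          have hu' : ∀ x ∈ u, pvQSum x.2 ≠ 0 → pvQSum x.2 < pvQSum e.2 := by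
            intro x hx hnz
            have := pvFM_max _ _ hU _ (mem_pvCands_of u x hx hnz)
            simp at this
            omega
          obtain ⟨m2, hm2ne, hfm2, hfold2⟩ := caseB hu'
          rw [show pvStepNZ m (e.1, pvQSum e.2) = (e.1, pvQSum e.2) by
              simp [pvStepNZ, hmbeq, hms], h1,
            if_pos hms, hfold2, hfm2]
          simp [hm2ne]
        · -- m survives the '' quest
          rw [show pvStepNZ m (e.1, pvQSum e.2) = m by simp [pvStepNZ, hmbeq, hms],
            if_neg hms]
          rw [show m = (m.1, m.2) from rfl, LA1 _ hcv_ne m.1 m.2 hm1, pvFM_some]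
          have hmem := pvRun_mem (pvCands v) (m.1, m.2)
          have hrne : (pvRun (m.1, m.2) (pvCands v)).1 ≠ "" := by
            rcases hmem with h' | h'
            · rw [h']; exact hm1
            · exact hcv_ne _ h'
          simp [hrne]

theorem main_tight (pq : List (String × List (String × List (String × Int))))
    (hpre : Pre_determine_best_stat_quest pq)
    (hD : D_determine_best_stat_quest pq) :
    determine_best_stat_quest pq ≠ determine_best_stat_quest_alt pq := by
  obtain ⟨hnd, _hkeys⟩ := hpre
  obtain ⟨i, hi1, hi2, hall⟩ := hD
  have hDk : D_determine_best_stat_quest pq := ⟨i, hi1, hi2, hall⟩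
  have hmem : pq[i] ∈ pq := List.getElem_mem _
  obtain ⟨u, v, huv⟩ := List.append_of_mem hmem
  have h1 : (pq[i]).1 = "" := hi1
  rw [huv] at hnd hDk ⊢
  obtain ⟨h2, hu', hv'⟩ := split_of_D u v pq[i] hnd h1 hDk
  have hndm : (u.map (fun x => x.1) ++ (pq[i]).1 :: v.map (fun x => x.1)).Nodup := by
    have := hnd
    rwa [List.map_append, List.map_cons] at this
  have hnu : "" ∉ u.map (fun x => x.1) := by
    have hd := (List.nodup_append.mp hndm).2.2
    intro hmem'
    exact hd _ hmem' _ (by simp) h1.symm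
  have hnv : "" ∉ v.map (fun x => x.1) := by
    have hmid := (List.nodup_append.mp hndm).2.1
    rw [List.nodup_cons] at hmid
    intro hmem'; exact hmid.1 (h1 ▸ hmem')
  have hcu_ne := pvCands_names_ne u hnu
  have hcv_ne := pvCands_names_ne v hnv
  -- B returns ([""], msg)
  have hB : determine_best_stat_quest_alt (u ++ pq[i] :: v)
      = ([""], "new best item belonging to stat bonuses") := by
    rw [B_char _ hnd, pvCands_append, pvCands_cons_nz _ v h2, pvFM_append, pvFM_cons]
    have hkeep : pvFM (some ((pq[i]).1, pvQSum (pq[i]).2)) (pvCands v)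
        = some ((pq[i]).1, pvQSum (pq[i]).2) := by
      rw [pvFM_some, pvRun_keep]
      intro w hw
      rcases pvCands_mem v w hw with ⟨x, hx, rfl, hxnz⟩
      exact hv' x hx hxnz
    cases hU : pvFM none (pvCands u) with
    | none =>
        dsimp only
        rw [hkeep]
        simp
        exact h1
    | some m =>
        have hmlt : m.2 < pvQSum (pq[i]).2 := by
          rcases pvCands_mem u m (pvFM_mem _ _ hU) with ⟨x, hx, rfl, hxnz⟩
          exact hu' x hx hxnz
        dsimp only
        rw [if_pos hmlt, hkeep]
        simp
        exact h1
  rw [hB, A_char]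
  by_cases hA : ((pvCands (u ++ pq[i] :: v)).foldl pvStepNZ ("", 0)).1 ≠ ""
  · rw [if_pos hA]
    intro hcontra
    exact hA (by simpa using congrArg Prod.fst hcontra)
  · rw [if_neg hA]
    intro hcontra
    exact absurd (congrArg Prod.fst hcontra) (by simp)

-- ===== VERDICT (by name: the statement is the Claim_ definition above) =====
theorem determine_best_stat_quest_spec : Claim_unchanged_determine_best_stat_quest := by
  unfold Claim_unchanged_determine_best_stat_quest
  intro pq _hdom hpre
  unfold Spec_determine_best_stat_quest
  intro hnD
  exact main_unchanged pq hpre hnD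
theorem determine_best_stat_quest_changed : Claim_changed_determine_best_stat_quest := by
  unfold Claim_changed_determine_best_stat_quest; decide
theorem determine_best_stat_quest_tight : Claim_exact_determine_best_stat_quest := by
  unfold Claim_exact_determine_best_stat_quest
  intro pq _hdom hpre hD
  exact main_tight pq hpre hD
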